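-- pv_equiv track=rewrite | github.com/adrianhardkor/shared_libs | wcommon.py | icx_intf_format
-- ===== SOURCE A (Python) =====
-- def is_int(s):
--     try:
--         int(s)
--         return True
--     except ValueError:
--         return False
--
-- def icx_intf_format(raw):
-- 	# first int of char+
-- 	i = 0
-- 	flag = False
-- 	for char in raw:
-- 		isint = is_int(char)
-- 		if isint and flag and str(char) != '.':
-- 			return(raw[i::])
-- 		elif not isint and str(char) != '.': flag = True
-- 		i = i + 1
-- 	return('')
-- ===== SOURCE B (Python) =====
-- def is_int(s):
--     try:
--         int(s)
--         return True
--     except ValueError: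
--         return False
--
-- def icx_intf_format(raw):
--     # two locate passes instead of one stateful flag loop
--     n = len(raw)
--     b = next((k for k in range(n) if not is_int(raw[k]) and raw[k] != '.'), None)
--     if b is None:
--         return ''
--     j = next((k for k in range(b, n) if is_int(raw[k])), None)
--     return raw[j:] if j is not None else ''
-- ===== Notes on version B (the rewrite author's own statement) =====
-- stated objective: alternative
-- what changed: Replaces A's single stateful flag-driven scan with two sequential locate passes: first find the index of the first non-digit non-dot character, then find the first digit at or after it and return the suffix from there.
import Mathlib
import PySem

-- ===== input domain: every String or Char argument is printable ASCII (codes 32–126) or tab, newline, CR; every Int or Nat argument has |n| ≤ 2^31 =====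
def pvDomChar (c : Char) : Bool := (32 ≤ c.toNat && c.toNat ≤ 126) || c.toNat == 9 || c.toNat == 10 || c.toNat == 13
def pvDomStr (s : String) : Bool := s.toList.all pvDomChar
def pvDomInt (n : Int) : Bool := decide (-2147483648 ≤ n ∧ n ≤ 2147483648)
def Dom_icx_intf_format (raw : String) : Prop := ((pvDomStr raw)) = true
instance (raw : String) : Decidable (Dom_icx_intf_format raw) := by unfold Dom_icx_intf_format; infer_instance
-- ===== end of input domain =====

-- B replaces A's single stateful flag-driven scan with two sequential locate passes
-- (find first non-digit non-dot char, then first digit from there); alternative decomposition, same cost.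


-- ===== PORT A =====
-- is_int(s): int(s) succeeds ↔ no ValueError
def isInt (s : String) : Bool := (PySem.Int.ofStr? s).isSome

-- the for-loop of A: state is the running index i and the flag
def aLoop (raw : String) : List Char → Nat → Bool → String
  | [], _, _ => ""
  | c :: cs, i, flag =>
    let isint := isInt (String.ofList [c])
    if isint && flag && (String.ofList [c] != ".") then
      String.ofList (PySem.Chars.slice raw.toList (some (i : Int)) none)   -- raw[i::]
    else if !isint && (String.ofList [c] != ".") then
      aLoop raw cs (i + 1) true
    else
      aLoop raw cs (i + 1) flag

def icx_intf_format (raw : String) : String := aLoop raw raw.toList 0 false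

-- ===== PORT B =====
def icx_intf_format_alt (raw : String) : String :=
  let cs := raw.toList
  match cs.findIdx? (fun c => !isInt (String.ofList [c]) && c != '.') with
  | none => ""
  | some b =>
    match (cs.drop b).findIdx? (fun c => isInt (String.ofList [c])) with
    | none => ""
    | some j => String.ofList (cs.drop (b + j))     -- raw[b+j:]

-- ===== PRECONDITION & SPEC =====
def Spec_icx_intf_format (raw : String) (out : String) : Prop := out = icx_intf_format_alt raw
instance (raw : String) (out : String) : Decidable (Spec_icx_intf_format raw out) := by unfold Spec_icx_intf_format; infer_instance

-- ===== CLAIM (what is proved, stated in full; the proofs are below) =====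
def Claim_equal_icx_intf_format : Prop := ∀ (raw : String), Dom_icx_intf_format raw → Spec_icx_intf_format raw (icx_intf_format raw)

-- ===== LEMMAS AND PROOFS =====

theorem singleton_ne_dot (c : Char) : (String.ofList [c] != ".") = !(c == '.') := by
  by_cases h : c = '.'
  · subst h; rfl
  · have hne : String.ofList [c] ≠ "." := by
      intro hs
      have := congrArg String.toList hs
      simp at this
      exact h this
    simp [bne, h, hne]

theorem isInt_dot : isInt "." = false := by decide

-- phase 2: once the flag is set, A returns the suffix at the first digit
theorem aLoop_true (raw : String) (cs : List Char) (i : Nat) :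
    aLoop raw cs i true =
      match cs.findIdx? (fun c => isInt (String.ofList [c])) with
      | none => ""
      | some j => String.ofList (raw.toList.drop (i + j)) := by
  induction cs generalizing i with
  | nil => rfl
  | cons c cs ih =>
    by_cases h : isInt (String.ofList [c]) = true
    · have hc : c ≠ '.' := fun hc => by subst hc; simp [isInt_dot] at h
      rw [aLoop, singleton_ne_dot]
      rw [if_pos (by simp [h, hc])]
      rw [List.findIdx?_cons, if_pos h]
      simp [PySem.Chars.slice_eq_listSlice, PySem.List.slice_from_natCast]
    · have h0 : isInt (String.ofList [c]) = false := by simpa using h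
      rw [aLoop, singleton_ne_dot, if_neg (by simp [h0])]
      rw [List.findIdx?_cons, if_neg h]
      have hsame : (if (!isInt (String.ofList [c]) && !(c == '.')) = true
            then aLoop raw cs (i + 1) true else aLoop raw cs (i + 1) true)
          = aLoop raw cs (i + 1) true := by split <;> rfl
      rw [hsame, ih]
      cases hf : cs.findIdx? (fun c => isInt (String.ofList [c])) with
      | none => rfl
      | some j =>
        simp only [Option.map_some]
        have e : i + 1 + j = i + (j + 1) := by omega
        rw [e]

-- phase 1: before the flag is set, A searches for the first non-digit non-dot char
theorem aLoop_false (raw : String) (cs : List Char) (i : Nat) :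
    aLoop raw cs i false =
      match cs.findIdx? (fun c => !isInt (String.ofList [c]) && c != '.') with
      | none => ""
      | some b =>
        match (cs.drop b).findIdx? (fun c => isInt (String.ofList [c])) with
        | none => ""
        | some j => String.ofList (raw.toList.drop (i + b + j)) := by
  induction cs generalizing i with
  | nil => rfl
  | cons c cs ih =>
    by_cases h : (!isInt (String.ofList [c]) && c != '.') = true
    · have h1 : isInt (String.ofList [c]) = false := by
        rcases Bool.and_eq_true .. |>.mp h with ⟨h1, _⟩; simpa using h1
      have h2 : ¬ c = '.' := by
        rcases Bool.and_eq_true .. |>.mp h with ⟨_, h2⟩; simpa using h2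
      rw [aLoop, singleton_ne_dot, if_neg (by simp), if_pos (by simp [h1, h2])]
      rw [aLoop_true]
      rw [List.findIdx?_cons, if_pos h]
      simp only [List.drop_zero]
      rw [List.findIdx?_cons, if_neg (by simp [h1])]
      cases hf : cs.findIdx? (fun c => isInt (String.ofList [c])) with
      | none => rfl
      | some j =>
        simp only [Option.map_some]
        have e : i + 1 + j = i + 0 + (j + 1) := by omega
        rw [e]
    · have h' : isInt (String.ofList [c]) = true ∨ c = '.' := by
        by_cases hi : isInt (String.ofList [c]) = true
        · exact Or.inl hi
        · have hi' : isInt (String.ofList [c]) = false := by simpa using hi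
          right; by_contra hc; exact h (by simp [hi', hc])
      have hbr : aLoop raw (c :: cs) i false = aLoop raw cs (i + 1) false := by
        rw [aLoop, singleton_ne_dot, if_neg (by simp)]
        rcases h' with hi | hc
        · have hc : c ≠ '.' := fun hc => by subst hc; simp [isInt_dot] at hi
          rw [if_neg (by simp [hi])]
        · subst hc; rw [if_neg (by simp)]
      rw [hbr, ih]
      rw [List.findIdx?_cons, if_neg h]
      cases hf : cs.findIdx? (fun c => !isInt (String.ofList [c]) && c != '.') with
      | none => rfl
      | some b =>
        simp only [Option.map_some, List.drop_succ_cons]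
        cases hg : (cs.drop b).findIdx? (fun c => isInt (String.ofList [c])) with
        | none => rfl
        | some j =>
          have e : i + 1 + b + j = i + (b + 1) + j := by omega
          simp [e]

-- ===== VERDICT (by name: the statement is the Claim_ definition above) =====
theorem icx_intf_format_spec : Claim_equal_icx_intf_format := by
  intro raw _
  show icx_intf_format raw = icx_intf_format_alt raw
  rw [icx_intf_format, aLoop_false, icx_intf_format_alt]
  cases hf : raw.toList.findIdx? (fun c => !isInt (String.ofList [c]) && c != '.') with
  | none => rfl
  | some b =>
    simp only
    cases hg : (raw.toList.drop b).findIdx? (fun c => isInt (String.ofList [c])) with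
    | none => rfl
    | some j => simp
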